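-- pv_equiv track=rewrite | github.com/Loquaxious/COSC121 | Lab 5/question19_num_rushes.py | num_rushes
-- ===== SOURCE A (Python) =====
-- def num_rushes(slope_height, rush_height_gain, back_sliding):
--     """Herbert the Heffalump"""
--     current_height = 0
--     rushes = 0
--     while current_height < slope_height:
--         rushes += 1
--         current_height += rush_height_gain
--         if current_height >= slope_height:
--             break
--         current_height -= back_sliding
--
--     return rushes
-- ===== SOURCE B (Python) =====
-- def num_rushes(slope_height, rush_height_gain, back_sliding):
--     """Herbert the Heffalump: number of rushes to climb the slope."""
--     if slope_height <= 0:
--         return 0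
--     remaining = slope_height - rush_height_gain
--     if remaining <= 0:
--         return 1
--     net = rush_height_gain - back_sliding
--     return 1 + -(-remaining // net)
-- ===== Notes on version B (the rewrite author's own statement) =====
-- stated objective: alternative
-- what changed: Replaced the rush-by-rush simulation loop with a closed-form ceiling-division formula; Pre_ keeps the exercise's natural domain, excluding inputs where A's loop never terminates and negative back_sliding on multi-rush slopes, where A's count depends on whether the upward 'slide' happens to cross the top.
-- outside the precondition, e.g. on num_rushes(10, 1, -5): A returns 2, B returns 3; on num_rushes(10, 1, 2): A does not finish within the time limit, B returns -8
import Mathlib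
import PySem

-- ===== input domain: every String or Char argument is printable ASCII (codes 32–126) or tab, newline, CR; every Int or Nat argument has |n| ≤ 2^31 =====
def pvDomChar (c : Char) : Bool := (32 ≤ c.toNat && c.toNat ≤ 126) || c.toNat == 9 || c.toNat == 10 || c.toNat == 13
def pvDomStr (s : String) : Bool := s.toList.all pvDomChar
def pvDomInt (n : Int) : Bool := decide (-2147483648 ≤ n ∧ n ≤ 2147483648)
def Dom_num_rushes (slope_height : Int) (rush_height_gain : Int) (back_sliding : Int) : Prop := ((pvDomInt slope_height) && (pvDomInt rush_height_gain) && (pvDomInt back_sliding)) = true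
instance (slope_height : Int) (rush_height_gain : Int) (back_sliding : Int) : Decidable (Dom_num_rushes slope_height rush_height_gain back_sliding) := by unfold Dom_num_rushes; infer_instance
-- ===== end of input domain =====

-- B replaces A's rush-by-rush simulation loop with a closed-form ceiling-division formula (objective: alternative).

-- ===== PORT A =====
-- A's while loop, totalized with fuel; the fuel chosen in num_rushes is enough for
-- every terminating run (Pre_num_rushes), and nothing is claimed where A diverges.
def numRushesLoop (s g b : Int) : Nat → Int → Int → Int
  | 0, _, r => r
  | f + 1, c, r =>
    if c < s then
      let c1 := c + g
      if s ≤ c1 then r + 1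
      else numRushesLoop s g b f (c1 - b) (r + 1)
    else r

def num_rushes (slope_height : Int) (rush_height_gain : Int) (back_sliding : Int) : Int :=
  numRushesLoop slope_height rush_height_gain back_sliding ((max slope_height 0).toNat + 2) 0 0

-- ===== PORT B =====
def num_rushes_alt (slope_height : Int) (rush_height_gain : Int) (back_sliding : Int) : Int :=
  if slope_height ≤ 0 then 0
  else
    let remaining := slope_height - rush_height_gain
    if remaining ≤ 0 then 1
    else 1 + -(PySem.Int.floordiv (-remaining) (rush_height_gain - back_sliding))

-- ===== PRECONDITION & SPEC =====
-- Pre_ keeps the natural domain of the exercise. It excludes (a) the inputs on which A's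
-- while loop never terminates (a positive slope that one rush cannot clear, with no positive
-- net progress per rush), and (b) negative back_sliding on a slope not cleared by one rush:
-- there the 'slide' is an extra upward gain and A's count depends on whether that slide
-- happens to cross the top — a corner no one would specify, where either count is defensible.
def Pre_num_rushes (slope_height : Int) (rush_height_gain : Int) (back_sliding : Int) : Prop :=
  slope_height ≤ 0 ∨ slope_height ≤ rush_height_gain ∨
    (0 ≤ back_sliding ∧ 0 < rush_height_gain - back_sliding)
instance (slope_height : Int) (rush_height_gain : Int) (back_sliding : Int) : Decidable (Pre_num_rushes slope_height rush_height_gain back_sliding) := by unfold Pre_num_rushes; infer_instance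
def pvWitness_num_rushes : Int × Int × Int := (10, 4, 1)

def Spec_num_rushes (slope_height : Int) (rush_height_gain : Int) (back_sliding : Int) (out : Int) : Prop := out = num_rushes_alt slope_height rush_height_gain back_sliding
instance (slope_height : Int) (rush_height_gain : Int) (back_sliding : Int) (out : Int) : Decidable (Spec_num_rushes slope_height rush_height_gain back_sliding out) := by unfold Spec_num_rushes; infer_instance

-- ===== CLAIM (what is proved, stated in full; the proofs are below) =====
def Claim_equal_num_rushes : Prop := ∀ (slope_height : Int) (rush_height_gain : Int) (back_sliding : Int), Dom_num_rushes slope_height rush_height_gain back_sliding → Pre_num_rushes slope_height rush_height_gain back_sliding → Spec_num_rushes slope_height rush_height_gain back_sliding (num_rushes slope_height rush_height_gain back_sliding)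

-- ===== LEMMAS AND PROOFS =====

-- the loop returns immediately once the slope is reached, whatever the fuel
lemma loop_done (s g b : Int) (f : Nat) (c r : Int) (h : s ≤ c) :
    numRushesLoop s g b f c r = r := by
  cases f <;> simp [numRushesLoop, not_lt.mpr h]

-- bracket characterisation of ceiling division -((-X) // net)
lemma cdiv_bracket (X net : Int) (h : 0 < net) :
    (-(PySem.Int.floordiv (-X) net) - 1) * net < X ∧ X ≤ -(PySem.Int.floordiv (-X) net) * net :=
  (PySem.Int.neg_floordiv_neg_eq_iff_of_pos h).mp rfl

lemma cdiv_nonpos (X net : Int) (h : 0 < net) (hx : X ≤ 0) :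
    -(PySem.Int.floordiv (-X) net) ≤ 0 := by
  have hb := (cdiv_bracket X net h).1
  by_contra hq
  push Not at hq
  have : 0 ≤ (-(PySem.Int.floordiv (-X) net) - 1) * net :=
    mul_nonneg (by omega) (by omega)
  omega

lemma cdiv_pos (X net : Int) (h : 0 < net) (hx : 1 ≤ X) :
    1 ≤ -(PySem.Int.floordiv (-X) net) := by
  have hb := (cdiv_bracket X net h).2
  by_contra hq
  push Not at hq
  have : -(PySem.Int.floordiv (-X) net) * net ≤ 0 :=
    mul_nonpos_of_nonpos_of_nonneg (by omega) (by omega)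
  omega

-- shifting the dividend by one net step decrements the ceiling quotient
lemma cdiv_sub_net (X net : Int) (h : 0 < net) :
    -(PySem.Int.floordiv (-(X - net)) net) = -(PySem.Int.floordiv (-X) net) - 1 := by
  obtain ⟨h1, h2⟩ := cdiv_bracket X net h
  rw [PySem.Int.neg_floordiv_neg_eq_iff_of_pos h]
  constructor <;> nlinarith

-- closed form of A's loop for nonnegative back-sliding and positive net progress
lemma loop_closed (s g b : Int) (hb : 0 ≤ b) (hnet : 0 < g - b) :
    ∀ (f : Nat) (c r : Int), c < s → s - c ≤ (f : Int) →
      numRushesLoop s g b f c r =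
        r + 1 + max 0 (-(PySem.Int.floordiv (-(s - c - g)) (g - b))) := by
  intro f
  induction f with
  | zero => intro c r hc hf; omega
  | succ f ih =>
    intro c r hc hf
    rw [numRushesLoop, if_pos hc]
    by_cases hbr : s ≤ c + g
    · rw [if_pos hbr]
      have : -(PySem.Int.floordiv (-(s - c - g)) (g - b)) ≤ 0 :=
        cdiv_nonpos _ _ hnet (by omega)
      omega
    · rw [if_neg hbr]
      rw [ih (c + g - b) (r + 1) (by omega) (by push_cast at hf ⊢; omega)]
      have hq1 : 1 ≤ -(PySem.Int.floordiv (-(s - c - g)) (g - b)) :=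
        cdiv_pos _ _ hnet (by omega)
      have hshift : -(PySem.Int.floordiv (-(s - (c + g - b) - g)) (g - b))
          = -(PySem.Int.floordiv (-(s - c - g)) (g - b)) - 1 := by
        have := cdiv_sub_net (s - c - g) (g - b) hnet
        rw [show s - (c + g - b) - g = (s - c - g) - (g - b) by ring]
        exact this
      rw [hshift]
      omega

-- ===== VERDICT (by name: the statement is the Claim_ definition above) =====
theorem num_rushes_spec : Claim_equal_num_rushes := by
  intro s g b _hdom hpre
  unfold Spec_num_rushes num_rushes num_rushes_alt
  by_cases hs : s ≤ 0
  · rw [loop_done s g b _ 0 0 hs, if_pos hs]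
  · rw [if_neg hs]
    by_cases hr : s - g ≤ 0
    · -- the first rush clears the slope
      rw [if_pos hr]
      rw [show (max s 0).toNat + 2 = ((max s 0).toNat + 1) + 1 from rfl,
          numRushesLoop, if_pos (show (0 : Int) < s by omega),
          if_pos (show s ≤ 0 + g by omega)]
      norm_num
    · rw [if_neg hr]
      obtain ⟨hb, hnet⟩ : 0 ≤ b ∧ 0 < g - b := by
        rcases hpre with h | h | h <;> omega
      rw [loop_closed s g b hb hnet _ 0 0 (by omega)
            (by push_cast; omega)]
      have : 1 ≤ -(PySem.Int.floordiv (-(s - 0 - g)) (g - b)) :=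
        cdiv_pos _ _ hnet (by omega)
      simp only [show s - 0 - g = s - g by ring] at this ⊢
      omega
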